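-- pv_equiv track=rewrite | github.com/ljeanette15/chemical-graph | circuit_tools.py | reduce_measurements_wrong
-- ===== SOURCE A (Python) =====
-- def get_pauli_stack(hamiltonian, nqubits):
--
--     pauli_stack = []
--
--     # Add strings to stack in order of least to most identity measurements
--     for i in range(nqubits):
--
--         # Each key is a pauli measurement
--         for key in hamiltonian.keys():
--
--             pauli_string = "I" * nqubits
--
--             # Tequila hamiltonian encodes the pauli strings using tuples. The first element in the tuple is
--             # the location of the character, and the second element is the character itself
--
--             for pauli_tuple in key:
--                 pauli_string = pauli_string[:pauli_tuple[0]] + pauli_tuple[1] + pauli_string[pauli_tuple[0]+1:]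
--
--             if pauli_string.count('I') == i:
--                 pauli_stack.append(pauli_string)
--
--     return pauli_stack
--
-- def get_I_indeces(pauli_str):
--
--     indeces = []
--     for i in range(len(pauli_str)):
--         if pauli_str[i] == 'I':
--             indeces.append(i)
--
--     return indeces
--
-- def remove_at_indeces(pauli_str, indeces):
--
--     # if there were any identities, remove them
--     if len(indeces) > 0:
--         shortened_pauli = pauli_str[:indeces[0]]
--         for j in range(len(indeces) - 1):
--             shortened_pauli += pauli_str[indeces[j]+1:indeces[j+1]]
--         shortened_pauli += pauli_str[indeces[-1]+1:]
--
--     else: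
--         shortened_pauli = pauli_str
--
--     return shortened_pauli
--
-- def reduce_measurements_wrong(hamiltonian, nqubits):
--
--     """
--     Takes a tequila hamiltonian object and reduces the number of measurements necessary to take experimentally.
--     When an identity measurement is required, the qubit can be measured experimentally in any basis, then traced over,
--     so the identity is a sort of wildcard. Therefore we can check if any measurements are "double counted" by the
--     identity and remove those measurements, calculating them post-data taking.
--
--     Inputs:
--         hamiltonian: a tequila hamiltonian object
--         nqubits: the number of qubits used in the circuit
--
--     Output: a minimal subset of measurements (pauli strings)
--
--     """
--
--     pauli_stack = get_pauli_stack(hamiltonian, nqubits)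
--
--
--     basis_measurements = {}
--
--
--     for pauli in pauli_stack:
--
--         # Get the indeces of any identity character in the string
--         pauli_indeces = get_I_indeces(pauli)
--
--         shortened_pauli = remove_at_indeces(pauli, pauli_indeces)
--
--         # Go through each basis already included in the minimal set
--         matched = False
--         for basis in basis_measurements:
--
--             # Remove the characters from the location of the identities in the pauli string
--             shortened_basis = remove_at_indeces(basis, pauli_indeces)
--
--             # Now find the indeces of the identity characters in the basis string
--             basis_indeces = get_I_indeces(shortened_basis)
--
--             shorter_basis = remove_at_indeces(shortened_basis, basis_indeces)
--             shorter_pauli = remove_at_indeces(shortened_pauli, basis_indeces)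
--
--             if shorter_pauli == shorter_basis:
--                 matched = True
--                 basis_measurements[basis].append(pauli)
--                 break
--
--         if matched == False:
--             basis_measurements[pauli] = [pauli]
--
--     return basis_measurements
-- ===== SOURCE B (Python) =====
-- def _build_pauli(key, nqubits):
--     s = "I" * nqubits
--     for pauli_tuple in key:
--         s = s[:pauli_tuple[0]] + pauli_tuple[1] + s[pauli_tuple[0]+1:]
--     return s
--
--
-- def _compatible(pauli, basis):
--     # Positions where pauli holds an identity are wildcards: drop them from both
--     # strings, then drop the remaining identity positions of the basis from both.
--     sp = ''.join(c for c in pauli if c != 'I')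
--     sb = ''.join(c for k, c in enumerate(basis) if k >= len(pauli) or pauli[k] != 'I')
--     sp2 = ''.join(c for k, c in enumerate(sp) if k >= len(sb) or sb[k] != 'I')
--     sb2 = ''.join(c for c in sb if c != 'I')
--     return sp2 == sb2
--
--
-- def reduce_measurements_wrong(hamiltonian, nqubits):
--     # Build each pauli string once and bucket it by identity count; then
--     # greedily group the stack into compatible bases as before.
--     buckets = [[] for _ in range(max(nqubits, 0))]
--     for key in hamiltonian:
--         s = _build_pauli(key, nqubits)
--         c = s.count('I')
--         if c < len(buckets):
--             buckets[c].append(s)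
--
--     basis_measurements = {}
--     for pauli in (p for bucket in buckets for p in bucket):
--         for basis in basis_measurements:
--             if _compatible(pauli, basis):
--                 basis_measurements[basis].append(pauli)
--                 break
--         else:
--             basis_measurements[pauli] = [pauli]
--     return basis_measurements
-- ===== Notes on version B (the rewrite author's own statement) =====
-- stated objective: alternative
-- what changed: B builds each pauli string once and buckets it by identity count instead of rebuilding every string in each of the nqubits passes, and tests basis compatibility with direct enumerate-and-filter passes over the strings instead of materialising identity-index lists and re-slicing around them; the greedy grouping pass itself has the same cost, so overall runtime is comparable.
import Mathlib
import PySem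

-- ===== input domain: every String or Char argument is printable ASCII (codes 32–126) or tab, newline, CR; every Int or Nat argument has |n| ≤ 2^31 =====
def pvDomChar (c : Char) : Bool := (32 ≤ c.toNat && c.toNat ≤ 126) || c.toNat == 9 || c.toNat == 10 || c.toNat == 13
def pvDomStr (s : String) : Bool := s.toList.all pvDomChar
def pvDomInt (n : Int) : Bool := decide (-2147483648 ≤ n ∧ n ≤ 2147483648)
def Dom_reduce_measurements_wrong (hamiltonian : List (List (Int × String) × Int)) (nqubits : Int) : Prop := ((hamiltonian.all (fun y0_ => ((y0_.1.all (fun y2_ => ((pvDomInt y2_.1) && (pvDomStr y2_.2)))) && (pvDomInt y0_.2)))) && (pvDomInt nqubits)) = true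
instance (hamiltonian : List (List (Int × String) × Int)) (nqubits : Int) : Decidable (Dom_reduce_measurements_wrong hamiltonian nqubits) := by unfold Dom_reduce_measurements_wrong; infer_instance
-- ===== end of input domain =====

-- B restructures A: it builds each pauli string once and buckets it by identity count
-- (A rebuilds every string in each of its nqubits passes), and tests basis compatibility
-- by direct enumerate-and-filter passes instead of index-list surgery; same return value.

-- shared helper: the pauli-string building loop (these lines are identical in Source A and Source B);
-- s[:p] + c + s[p+1:] is exact via PySem.List.slice (clamping/negative indices as in Python)
def pvBuild (nqubits : Int) (key : List (Int × String)) : List Char :=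
  key.foldl (fun s pt =>
      PySem.List.slice s none (some pt.1) ++ pt.2.toList ++ PySem.List.slice s (some (pt.1 + 1)) none)
    (List.replicate nqubits.toNat 'I')

-- ===== PORT A =====
-- dict keys: hamiltonian.keys() = distinct keys in insertion order (PySem.Dict.ofList).
-- s.count('I') is PySem.Chars.count s ['I'] (exact; single-char pattern).
def get_pauli_stack (hamiltonian : List (List (Int × String) × Int)) (nqubits : Int) : List (List Char) :=
  (PySem.List.pyRange 0 nqubits 1).foldl (fun stack i =>
    ((PySem.Dict.ofList hamiltonian).keys).foldl (fun stack key =>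
      let pauli_string := pvBuild nqubits key
      if ((PySem.Chars.count pauli_string ['I'] : Int) = i) then stack ++ [pauli_string] else stack)
      stack) []

def get_I_indeces (s : List Char) : List Int :=
  (PySem.List.pyRange 0 (s.length : Int) 1).foldl
    (fun acc i => if PySem.List.pyGet? s i = some 'I' then acc ++ [i] else acc) []

def remove_at_indeces (s : List Char) (idx : List Int) : List Char :=
  if 0 < idx.length then
    let r0 := PySem.List.slice s none (some (PySem.List.pyGetD idx 0 0))
    let r1 := (PySem.List.pyRange 0 ((idx.length : Int) - 1) 1).foldl
      (fun r j => r ++ PySem.List.slice s (some (PySem.List.pyGetD idx j 0 + 1))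
                          (some (PySem.List.pyGetD idx (j + 1) 0))) r0
    r1 ++ PySem.List.slice s (some (PySem.List.pyGetD idx (-1) 0 + 1)) none
  else s

-- the 'for basis in basis_measurements: … break' loop (returns the first matching basis)
def pvFindA (keys : List (List Char)) (pauli_indeces : List Int) (shortened_pauli : List Char) :
    Option (List Char) :=
  match keys with
  | [] => none
  | basis :: rest =>
    let shortened_basis := remove_at_indeces basis pauli_indeces
    let basis_indeces := get_I_indeces shortened_basis
    let shorter_basis := remove_at_indeces shortened_basis basis_indeces
    let shorter_pauli := remove_at_indeces shortened_pauli basis_indeces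
    if shorter_pauli = shorter_basis then some basis else pvFindA rest pauli_indeces shortened_pauli

-- the str-keyed result dict is kept over List Char and converted at the very end (String ↔ List Char is 1-1)
def reduce_measurements_wrong (hamiltonian : List (List (Int × String) × Int)) (nqubits : Int) :
    List (String × List String) :=
  let pauli_stack := get_pauli_stack hamiltonian nqubits
  let d := pauli_stack.foldl (fun (d : PySem.Dict (List Char) (List (List Char))) pauli =>
      let pauli_indeces := get_I_indeces pauli
      let shortened_pauli := remove_at_indeces pauli pauli_indeces
      match pvFindA d.keys pauli_indeces shortened_pauli with
      | some basis => d.modify basis [] (fun v => v ++ [pauli])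
      | none => d.insert pauli [pauli]) PySem.Dict.empty
  d.items.map (fun p => (String.ofList p.1, p.2.map String.ofList))

-- ===== PORT B =====
-- ''.join(c for c in s if c != 'I')
def pvShort (s : List Char) : List Char := s.filter (fun c => c ≠ 'I')

-- ''.join(c for k, c in enumerate(t) if k >= len(ref) or ref[k] != 'I')
def pvMask (ref t : List Char) : List Char :=
  ((PySem.List.enumerate t).filter
      (fun kc => decide ((ref.length : Int) ≤ kc.1 ∨ ¬ PySem.List.pyGet? ref kc.1 = some 'I'))).map
    (fun kc => kc.2)

def pvCompat (pauli basis : List Char) : Bool :=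
  let sp := pvShort pauli
  let sb := pvMask pauli basis
  decide (pvMask sb sp = pvShort sb)

def pvFindB (keys : List (List Char)) (pauli : List Char) : Option (List Char) :=
  match keys with
  | [] => none
  | basis :: rest => if pvCompat pauli basis then some basis else pvFindB rest pauli

def pvBuckets (hamiltonian : List (List (Int × String) × Int)) (nqubits : Int) :
    List (List (List Char)) :=
  ((PySem.Dict.ofList hamiltonian).keys).foldl (fun buckets key =>
      let s := pvBuild nqubits key
      let c := PySem.Chars.count s ['I']
      if c < buckets.length then buckets.set c (buckets.getD c [] ++ [s]) else buckets)
    (List.replicate nqubits.toNat [])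

def reduce_measurements_wrong_alt (hamiltonian : List (List (Int × String) × Int)) (nqubits : Int) :
    List (String × List String) :=
  let d := ((pvBuckets hamiltonian nqubits).flatten).foldl
      (fun (d : PySem.Dict (List Char) (List (List Char))) pauli =>
        match pvFindB d.keys pauli with
        | some basis => d.modify basis [] (fun v => v ++ [pauli])
        | none => d.insert pauli [pauli]) PySem.Dict.empty
  d.items.map (fun p => (String.ofList p.1, p.2.map String.ofList))

-- ===== PRECONDITION & SPEC =====
def Spec_reduce_measurements_wrong (hamiltonian : List (List (Int × String) × Int)) (nqubits : Int) (out : List (String × List String)) : Prop := out = reduce_measurements_wrong_alt hamiltonian nqubits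
instance (hamiltonian : List (List (Int × String) × Int)) (nqubits : Int) (out : List (String × List String)) : Decidable (Spec_reduce_measurements_wrong hamiltonian nqubits out) := by unfold Spec_reduce_measurements_wrong; infer_instance

-- ===== CLAIM (what is proved, stated in full; the proofs are below) =====
def Claim_equal_reduce_measurements_wrong : Prop := ∀ (hamiltonian : List (List (Int × String) × Int)) (nqubits : Int), Dom_reduce_measurements_wrong hamiltonian nqubits → Spec_reduce_measurements_wrong hamiltonian nqubits (reduce_measurements_wrong hamiltonian nqubits)

-- ===== LEMMAS AND PROOFS =====

-- every index in enumerate xs st is ≥ st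
theorem pvEnumGe {α : Type} (xs : List α) (st : Int) (p : Int × α)
    (hp : p ∈ PySem.List.enumerate xs st) : st ≤ p.1 := by
  rcases (PySem.List.mem_enumerate_iff xs st p).1 hp with ⟨k, hk, rfl⟩
  show st ≤ st + (k : Int)
  omega

-- filtering enumerate by "index ≥ st + m" is enumerate of drop
theorem pvFilterGe {α : Type} (xs : List α) (st : Int) (m : Nat) :
    (PySem.List.enumerate xs st).filter (fun kc => decide (st + (m : Int) ≤ kc.1)) =
      PySem.List.enumerate (xs.drop m) (st + m) := by
  induction xs generalizing st m with
  | nil => simp [PySem.List.enumerate]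
  | cons c t ih =>
    rw [PySem.List.enumerate_cons]
    cases m with
    | zero =>
      simp only [Nat.cast_zero, add_zero, List.drop_zero]
      rw [List.filter_cons_of_pos (by simp), PySem.List.enumerate_cons]
      congr 1
      rw [List.filter_eq_self]
      intro p hp
      have := pvEnumGe t (st + 1) p hp
      simp only [decide_eq_true_eq]
      push_cast
      omega
    | succ m' =>
      rw [List.filter_cons_of_neg (by simp only [decide_eq_true_eq]; push_cast; omega)]
      have := ih (st + 1) m'
      rw [show st + ((m' + 1 : Nat) : Int) = (st + 1) + (m' : Int) by push_cast; ring]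
      rw [this, List.drop_succ_cons]

-- filtering enumerate by "index < st + m" and projecting is take
theorem pvFilterLt {α : Type} (xs : List α) (st : Int) (m : Nat) :
    ((PySem.List.enumerate xs st).filter (fun kc => decide (kc.1 < st + (m : Int)))).map
        (fun kc => kc.2) = xs.take m := by
  induction xs generalizing st m with
  | nil => simp [PySem.List.enumerate]
  | cons c t ih =>
    rw [PySem.List.enumerate_cons]
    cases m with
    | zero =>
      simp only [Nat.cast_zero, add_zero, List.take_zero]
      rw [List.filter_cons_of_neg (by simp)]
      have : (PySem.List.enumerate t (st + 1)).filter (fun kc => decide (kc.1 < st)) = [] := by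
        rw [List.filter_eq_nil_iff]
        intro p hp
        have := pvEnumGe t (st + 1) p hp
        simp only [decide_eq_true_eq]
        omega
      rw [this]; rfl
    | succ m' =>
      rw [List.filter_cons_of_pos (by simp only [decide_eq_true_eq]; push_cast; omega)]
      have := ih (st + 1) m'
      rw [show st + ((m' + 1 : Nat) : Int) = (st + 1) + (m' : Int) by push_cast; ring] at *
      simp only [List.map_cons, this, List.take_succ_cons]

-- filtering enumerate by an interval of indices and projecting is drop-take
theorem pvFilterBand (xs : List Char) (a b : Nat) :
    ((PySem.List.enumerate xs).filter
        (fun kc => decide ((a : Int) ≤ kc.1 ∧ kc.1 < (b : Int)))).map (fun kc => kc.2) =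
      (xs.drop a).take (b - a) := by
  by_cases hab : b ≤ a
  · have h0 : b - a = 0 := by omega
    rw [h0, List.take_zero, List.map_eq_nil_iff, List.filter_eq_nil_iff]
    intro p _; simp only [decide_eq_true_eq, not_and, not_lt]; intro; omega
  · have : (fun kc : Int × Char => decide ((a : Int) ≤ kc.1 ∧ kc.1 < (b : Int))) =
        (fun kc : Int × Char => decide (kc.1 < (b : Int)) && decide ((a : Int) ≤ kc.1)) := by
      funext kc; rw [Bool.decide_and, Bool.and_comm]
    rw [this, ← List.filter_filter]
    have h1 : (PySem.List.enumerate xs 0).filter (fun kc => decide ((a : Int) ≤ kc.1)) =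
        PySem.List.enumerate (xs.drop a) ((0 : Int) + a) := by
      rw [← pvFilterGe]; congr 1; funext kc; simp
    rw [h1]
    have h2 := pvFilterLt (xs.drop a) ((0 : Int) + a) (b - a)
    rw [show ((0 : Int) + a) + ((b - a : Nat) : Int) = (b : Int) by push_cast [Nat.cast_sub (by omega : a ≤ b)]; ring] at h2
    rw [← h2]

-- a filter by a disjunction of index-separated predicates splits into an append
theorem pvSplitFilter {α : Type} (xs : List α) (st : Int) (P1 P2 : Int → Prop)
    [DecidablePred P1] [DecidablePred P2] (j : Int)
    (h1 : ∀ k, P1 k → k < j) (h2 : ∀ k, P2 k → j ≤ k) :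
    (PySem.List.enumerate xs st).filter (fun kc => decide (P1 kc.1 ∨ P2 kc.1)) =
      (PySem.List.enumerate xs st).filter (fun kc => decide (P1 kc.1)) ++
        (PySem.List.enumerate xs st).filter (fun kc => decide (P2 kc.1)) := by
  induction xs generalizing st with
  | nil => simp [PySem.List.enumerate]
  | cons c t ih =>
    rw [PySem.List.enumerate_cons]
    by_cases hp1 : P1 st
    · have hnp2 : ¬ P2 st := fun h => absurd (h2 st h) (by have := h1 st hp1; omega)
      rw [List.filter_cons_of_pos (by simp [hp1]), List.filter_cons_of_pos (by simp [hp1]),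
        List.filter_cons_of_neg (by simp [hnp2])]
      rw [List.cons_append, ih (st + 1)]
    · by_cases hp2 : P2 st
      · rw [List.filter_cons_of_pos (by simp [hp2]), List.filter_cons_of_neg (by simp [hp1]),
          List.filter_cons_of_pos (by simp [hp2])]
        have hnil : (PySem.List.enumerate t (st + 1)).filter (fun kc => decide (P1 kc.1)) = [] := by
          rw [List.filter_eq_nil_iff]
          intro p hp
          have hge := pvEnumGe t (st + 1) p hp
          have := h2 st hp2
          simp only [decide_eq_true_eq]
          intro hP1
          have := h1 p.1 hP1
          omega
        have hall : (PySem.List.enumerate t (st + 1)).filter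
            (fun kc => decide (P1 kc.1 ∨ P2 kc.1)) =
            (PySem.List.enumerate t (st + 1)).filter (fun kc => decide (P2 kc.1)) := by
          apply List.filter_congr
          intro p hp
          have hge := pvEnumGe t (st + 1) p hp
          have := h2 st hp2
          simp only [decide_eq_decide]
          constructor
          · rintro (hP1 | h); · exact absurd (h1 p.1 hP1) (by omega)
            · exact h
          · exact Or.inr
        rw [hall, hnil]; rfl
      · rw [List.filter_cons_of_neg (by simp [hp1, hp2]), List.filter_cons_of_neg (by simp [hp1]),
          List.filter_cons_of_neg (by simp [hp2])]
        exact ih (st + 1)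

-- index-loop over consecutive pairs = recursion over zip with tail
theorem pvPairs (idx : List Int) (f : Int → Int → List Char) :
    (List.range (idx.length - 1)).flatMap
        (fun j => f (idx.getD j 0) (idx.getD (j + 1) 0)) =
      (idx.zip idx.tail).flatMap (fun ab => f ab.1 ab.2) := by
  induction idx with
  | nil => simp
  | cons a l ih =>
    cases l with
    | nil => simp
    | cons b t =>
      have hlen : (a :: b :: t).length - 1 = ((b :: t).length - 1) + 1 := by simp
      rw [hlen, List.range_succ_eq_map]
      simp only [List.flatMap_cons, List.flatMap_map]
      have : ∀ j : Nat, f ((a :: b :: t).getD (Nat.succ j) 0) ((a :: b :: t).getD (Nat.succ j + 1) 0)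
          = f ((b :: t).getD j 0) ((b :: t).getD (j + 1) 0) := by intro j; rfl
      simp only [this]
      rw [show (List.range ((b :: t).length - 1)).flatMap
            (fun j => f ((b :: t).getD j 0) ((b :: t).getD (j + 1) 0)) =
          ((b :: t).zip (b :: t).tail).flatMap (fun ab => f ab.1 ab.2) from ih]
      rfl

-- the chain of middle-pieces of remove_at_indeces, recursively
def pvPieces (s : List Char) (prev : Int) (l : List Int) : List Char :=
  match l with
  | [] => PySem.List.slice s (some (prev + 1)) none
  | j :: rest => PySem.List.slice s (some (prev + 1)) (some j) ++ pvPieces s j rest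

theorem pvPiecesEq (s : List Char) (l : List Int) (i : Int) :
    ((i :: l).zip l).flatMap (fun ab => PySem.List.slice s (some (ab.1 + 1)) (some ab.2)) ++
        PySem.List.slice s (some ((i :: l).getLast (by simp) + 1)) none =
      pvPieces s i l := by
  induction l generalizing i with
  | nil => simp [pvPieces]
  | cons j rest ih =>
    simp only [List.zip_cons_cons, List.flatMap_cons, pvPieces]
    rw [List.append_assoc]
    rw [show ((i :: j :: rest).getLast (by simp)) = ((j :: rest).getLast (by simp)) from
      List.getLast_cons (by simp)]
    congr 1
    exact ih j

theorem pvPiecesSpec (s : List Char) (l : List Int) (prev : Int) (hprev : 0 ≤ prev)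
    (hgt : ∀ x ∈ l, prev < x) (hpw : l.Pairwise (· < ·)) :
    pvPieces s prev l =
      ((PySem.List.enumerate s).filter
          (fun kc => decide (prev < kc.1 ∧ kc.1 ∉ l))).map (fun kc => kc.2) := by
  induction l generalizing prev with
  | nil =>
    simp only [pvPieces, List.not_mem_nil, not_false_iff, and_true]
    rw [PySem.List.slice_from s (by omega : (0:Int) ≤ prev + 1)]
    have h := pvFilterGe s 0 (prev + 1).toNat
    have hcong : (PySem.List.enumerate s 0).filter (fun kc => decide (prev < kc.1)) =
        (PySem.List.enumerate s 0).filter (fun kc => decide ((0:Int) + ((prev + 1).toNat : Int) ≤ kc.1)) := by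
      apply List.filter_congr; intro p _; simp only [decide_eq_decide]; omega
    rw [hcong, h, PySem.List.map_snd_enumerate]
  | cons j rest ih =>
    have hj : prev < j := hgt j (by simp)
    have hrest : ∀ x ∈ rest, j < x := by
      intro x hx; exact (List.pairwise_cons.1 hpw).1 x hx
    simp only [pvPieces]
    rw [ih j (by omega) hrest (List.pairwise_cons.1 hpw).2]
    have hsl : PySem.List.slice s (some (prev + 1)) (some j) =
        ((PySem.List.enumerate s).filter
            (fun kc => decide (prev < kc.1 ∧ kc.1 < j))).map (fun kc => kc.2) := by
      have h := pvFilterBand s (prev + 1).toNat j.toNat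
      rw [PySem.List.slice_toNat s (by omega : (0:Int) ≤ prev + 1) (by omega : (0:Int) ≤ j)]
      rw [← h]
      congr 1
      apply List.filter_congr; intro p _; simp only [decide_eq_decide]; omega
    rw [hsl, ← List.map_append]
    congr 1
    rw [← pvSplitFilter s 0 (fun k => prev < k ∧ k < j) (fun k => j < k ∧ k ∉ rest) j
        (fun k hk => hk.2) (fun k hk => le_of_lt hk.1)]
    apply List.filter_congr
    intro p _
    simp only [decide_eq_decide, List.mem_cons, not_or]
    by_cases hmem : p.1 ∈ rest
    · have hx := hrest p.1 hmem
      constructor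
      · rintro (⟨-, h⟩ | ⟨-, h⟩)
        · exact absurd hx (by omega)
        · exact absurd hmem h
      · rintro ⟨-, -, h3⟩; exact absurd hmem h3
    · constructor
      · rintro (⟨h1, h2⟩ | ⟨h1, -⟩)
        · exact ⟨h1, by omega, hmem⟩
        · exact ⟨by omega, by omega, hmem⟩
      · rintro ⟨h1, h2, -⟩
        rcases lt_trichotomy p.1 j with h | h | h
        · exact Or.inl ⟨h1, h⟩
        · exact absurd h h2
        · exact Or.inr ⟨h, hmem⟩

-- MAIN removal lemma: for a strictly increasing list of nonnegative indices,
-- A's slice-concatenation removal is the filter "keep positions not in idx"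
theorem pvRemoveSpec (s : List Char) (idx : List Int) (hpw : idx.Pairwise (· < ·))
    (hnn : ∀ i ∈ idx, 0 ≤ i) :
    remove_at_indeces s idx =
      ((PySem.List.enumerate s).filter (fun kc => decide (kc.1 ∉ idx))).map (fun kc => kc.2) := by
  cases idx with
  | nil =>
    simp only [remove_at_indeces, List.length_nil, lt_irrefl, if_false]
    rw [List.filter_eq_self.2 (by intro p _; simp), PySem.List.map_snd_enumerate]
  | cons i l =>
    have hi : 0 ≤ i := hnn i (by simp)
    have hgt : ∀ x ∈ l, i < x := fun x hx => (List.pairwise_cons.1 hpw).1 x hx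
    simp only [remove_at_indeces, List.length_cons, Nat.succ_pos, if_pos]
    rw [PySem.List.foldl_append_eq_flatMap]
    rw [PySem.List.pyGetD_zero_cons]
    rw [PySem.List.pyGetD_neg_one (i :: l) 0 (by simp)]
    -- convert the pyRange index loop into the zip form
    have hrange : PySem.List.pyRange 0 (((l.length + 1 : Nat) : Int) - 1) 1 =
        (List.range ((i :: l).length - 1)).map (fun (k : Nat) => (k : Int)) := by
      rw [show (((l.length + 1 : Nat) : Int) - 1) = ((l.length : Nat) : Int) by push_cast; ring]
      exact PySem.List.pyRange_zero_natCast l.length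
    rw [hrange, List.flatMap_map]
    have hcast : ∀ j : Nat,
        PySem.List.slice s (some (PySem.List.pyGetD (i :: l) (j : Int) 0 + 1))
            (some (PySem.List.pyGetD (i :: l) ((j : Int) + 1) 0)) =
          PySem.List.slice s (some ((i :: l).getD j 0 + 1)) (some ((i :: l).getD (j + 1) 0)) := by
      intro j
      rw [PySem.List.pyGetD_natCast, show ((j : Int) + 1) = ((j + 1 : Nat) : Int) by push_cast; ring,
        PySem.List.pyGetD_natCast]
    simp only [hcast]
    rw [pvPairs (i :: l) (fun a b => PySem.List.slice s (some (a + 1)) (some b))]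
    rw [List.append_assoc]
    rw [show ((i :: l).zip (i :: l).tail) = ((i :: l).zip l) from rfl]
    rw [pvPiecesEq s l i]
    rw [pvPiecesSpec s l i hi hgt (List.pairwise_cons.1 hpw).2]
    rw [PySem.List.slice_to s hi]
    have htake : s.take i.toNat =
        ((PySem.List.enumerate s).filter (fun kc => decide (kc.1 < i))).map (fun kc => kc.2) := by
      have h := pvFilterLt s 0 i.toNat
      rw [← h]
      congr 1
      apply List.filter_congr; intro p _; simp only [decide_eq_decide]; omega
    rw [htake, ← List.map_append]
    congr 1
    rw [← pvSplitFilter s 0 (fun k => k < i) (fun k => i < k ∧ k ∉ l) i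
        (fun k hk => hk) (fun k hk => le_of_lt hk.1)]
    apply List.filter_congr
    intro p _
    simp only [decide_eq_decide, List.mem_cons, not_or]
    by_cases hmem : p.1 ∈ l
    · have hx := hgt p.1 hmem
      constructor
      · rintro (h | ⟨-, h⟩)
        · exact absurd hx (by omega)
        · exact absurd hmem h
      · rintro ⟨-, h⟩; exact absurd hmem h
    · constructor
      · rintro (h | ⟨h1, -⟩)
        · exact ⟨by omega, hmem⟩
        · exact ⟨by omega, hmem⟩
      · rintro ⟨h1, -⟩
        rcases lt_trichotomy p.1 i with h | h | h
        · exact Or.inl h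
        · exact absurd h h1
        · exact Or.inr ⟨h, hmem⟩

-- characterisation of get_I_indeces
theorem pvGetIeq (s : List Char) :
    get_I_indeces s = (PySem.List.pyRange 0 (s.length : Int) 1).filter
      (fun i => decide (PySem.List.pyGet? s i = some 'I')) := by
  unfold get_I_indeces
  rw [PySem.List.foldl_append_ite_eq_filter]
  rfl

theorem pvMemGetI (s : List Char) (k : Int) :
    k ∈ get_I_indeces s ↔ 0 ≤ k ∧ k < (s.length : Int) ∧ PySem.List.pyGet? s k = some 'I' := by
  rw [pvGetIeq, List.mem_filter]
  simp only [PySem.List.mem_pyRange_one, decide_eq_true_eq]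
  tauto

theorem pvGetIpw (s : List Char) : (get_I_indeces s).Pairwise (· < ·) := by
  rw [pvGetIeq]
  apply List.Pairwise.filter
  rw [PySem.List.pyRange_zero_natCast]
  exact (List.pairwise_map.2 (by
    simpa using List.pairwise_lt_range (n := s.length)))

-- removing the identity positions of ref from t is B's pvMask
theorem pvRemoveMask (ref t : List Char) :
    remove_at_indeces t (get_I_indeces ref) = pvMask ref t := by
  rw [pvRemoveSpec t (get_I_indeces ref) (pvGetIpw ref)
    (fun i hi => ((pvMemGetI ref i).1 hi).1)]
  unfold pvMask
  congr 1
  apply List.filter_congr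
  intro p hp
  have hge : (0 : Int) ≤ p.1 := pvEnumGe t 0 p hp
  simp only [decide_eq_decide, pvMemGetI]
  constructor
  · intro h
    by_cases hlen : (ref.length : Int) ≤ p.1
    · exact Or.inl hlen
    · exact Or.inr (fun hI => h ⟨hge, by omega, hI⟩)
  · rintro (h | h) hmem
    · omega
    · exact h hmem.2.2

-- a filter of enumerate whose condition only reads the element is a plain filter
theorem pvFilterSnd {α : Type} (xs : List α) (st : Int) (q : α → Bool) :
    ((PySem.List.enumerate xs st).filter (fun kc => q kc.2)).map (fun kc => kc.2) =
      xs.filter q := by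
  induction xs generalizing st with
  | nil => simp [PySem.List.enumerate]
  | cons c t ih =>
    rw [PySem.List.enumerate_cons]
    by_cases hq : q c
    · rw [List.filter_cons_of_pos (by simpa using hq), List.filter_cons_of_pos (by simpa using hq)]
      simp only [List.map_cons, ih]
    · rw [List.filter_cons_of_neg (by simpa using hq), List.filter_cons_of_neg (by simpa using hq)]
      exact ih (st + 1)

-- masking a string with itself just deletes its identity characters
theorem pvMaskSelf (s : List Char) : pvMask s s = pvShort s := by
  unfold pvMask pvShort
  have hcong : (PySem.List.enumerate s).filter
      (fun kc => decide ((s.length : Int) ≤ kc.1 ∨ ¬ PySem.List.pyGet? s kc.1 = some 'I')) =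
      (PySem.List.enumerate s).filter (fun kc : Int × Char => (fun c => decide (c ≠ 'I')) kc.2) := by
    apply List.filter_congr
    intro p hp
    rcases (PySem.List.mem_enumerate_iff s 0 p).1 hp with ⟨k, hk, rfl⟩
    simp only [zero_add, decide_eq_decide, PySem.List.pyGet?_natCast]
    rw [List.getElem?_eq_getElem hk]
    have hklen : ¬ (s.length : Int) ≤ (k : Int) := by exact_mod_cast not_le.2 hk
    simp [hklen]
  rw [hcong]
  exact pvFilterSnd s 0 (fun c => decide (c ≠ 'I'))

-- removing a string's own identity positions deletes its identity characters
theorem pvRemoveSelf (s : List Char) :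
    remove_at_indeces s (get_I_indeces s) = pvShort s := by
  rw [pvRemoveMask s s, pvMaskSelf]

-- the basis-searching loops of A and B agree
theorem pvFindEq (keys : List (List Char)) (p : List Char) :
    pvFindA keys (get_I_indeces p) (remove_at_indeces p (get_I_indeces p)) = pvFindB keys p := by
  induction keys with
  | nil => rfl
  | cons basis rest ih =>
    simp only [pvRemoveSelf] at ih
    simp only [pvFindA, pvFindB, pvRemoveMask, pvRemoveSelf, pvMaskSelf, pvCompat, ih,
      decide_eq_true_eq]

-- set on a map-over-range is a pointwise update
theorem pvSetMapRange {α : Type} (n : Nat) (g : Nat → α) (c : Nat) (v : α) (hc : c < n) :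
    ((List.range n).map g).set c v =
      (List.range n).map (fun c' => if c' = c then v else g c') := by
  apply List.ext_getElem
  · simp
  · intro i h1 h2
    simp only [List.length_set, List.length_map, List.length_range] at h1
    rw [List.getElem_set]
    simp only [List.getElem_map, List.getElem_range]
    by_cases hic : c = i
    · simp [hic]
    · rw [if_neg hic, if_neg (fun h => hic h.symm)]

-- B's bucket loop, characterised
theorem pvBucketsInv (nqubits : Int) (ks : List (List (Int × String))) (n : Nat)
    (g : Nat → List (List Char)) :
    ks.foldl (fun buckets key =>
        let s := pvBuild nqubits key
        let c := PySem.Chars.count s ['I']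
        if c < buckets.length then buckets.set c (buckets.getD c [] ++ [s]) else buckets)
      ((List.range n).map g) =
      (List.range n).map (fun c => g c ++
        ((ks.filter (fun k => PySem.Chars.count (pvBuild nqubits k) ['I'] = c)).map
          (pvBuild nqubits))) := by
  induction ks generalizing g with
  | nil => simp
  | cons k ks ih =>
    rw [List.foldl_cons]
    set s := pvBuild nqubits k with hs
    set c0 := PySem.Chars.count s ['I'] with hc0
    by_cases hlt : c0 < n
    · have hlen : c0 < ((List.range n).map g).length := by simpa using hlt
      rw [if_pos hlen]
      have hgetD : ((List.range n).map g).getD c0 [] = g c0 := by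
        rw [List.getD_eq_getElem _ _ (by simpa using hlt)]
        simp
      rw [hgetD, pvSetMapRange n g c0 (g c0 ++ [s]) hlt]
      rw [ih (fun c' => if c' = c0 then g c0 ++ [s] else g c')]
      apply List.map_congr_left
      intro c hc
      simp only [List.mem_range] at hc
      by_cases hcc : c = c0
      · subst hcc
        rw [if_pos rfl, List.filter_cons_of_pos (by simp [← hs, ← hc0]), List.map_cons]
        simp [← hs]
      · rw [if_neg hcc, List.filter_cons_of_neg (by simp [← hs, ← hc0]; omega)]
    · have hlen : ¬ c0 < ((List.range n).map g).length := by simpa using hlt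
      rw [if_neg hlen, ih g]
      apply List.map_congr_left
      intro c hc
      simp only [List.mem_range] at hc
      rw [List.filter_cons_of_neg (by simp [← hs, ← hc0]; omega)]

-- PHASE 1: A's stack equals B's flattened buckets
theorem pvStackEq (hamiltonian : List (List (Int × String) × Int)) (nqubits : Int) :
    get_pauli_stack hamiltonian nqubits = (pvBuckets hamiltonian nqubits).flatten := by
  unfold get_pauli_stack pvBuckets
  set ks := (PySem.Dict.ofList hamiltonian).keys with hks
  -- A side: turn the two nested append-loops into a flatMap of filters
  have hinner : ∀ (i : Int) (stack : List (List Char)),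
      ks.foldl (fun stack key =>
        let pauli_string := pvBuild nqubits key
        if ((PySem.Chars.count pauli_string ['I'] : Int) = i) then stack ++ [pauli_string]
        else stack) stack =
      stack ++ ((ks.filter (fun key =>
          decide ((PySem.Chars.count (pvBuild nqubits key) ['I'] : Int) = i))).map
        (pvBuild nqubits)) := by
    intro i stack
    have hstep : (fun (stack : List (List Char)) key =>
        let pauli_string := pvBuild nqubits key
        if ((PySem.Chars.count pauli_string ['I'] : Int) = i) then stack ++ [pauli_string]
        else stack) = (fun (stack : List (List Char)) key =>
          if (fun key => decide ((PySem.Chars.count (pvBuild nqubits key) ['I'] : Int) = i)) key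
              = true then stack ++ [pvBuild nqubits key] else stack) := by
      funext stack key
      simp
    rw [hstep, PySem.List.foldl_append_if]
  have houter : (fun (stack : List (List Char)) (i : Int) =>
      ks.foldl (fun stack key =>
        let pauli_string := pvBuild nqubits key
        if ((PySem.Chars.count pauli_string ['I'] : Int) = i) then stack ++ [pauli_string]
        else stack) stack) = (fun stack i => stack ++ ((ks.filter (fun key =>
          decide ((PySem.Chars.count (pvBuild nqubits key) ['I'] : Int) = i))).map
            (pvBuild nqubits))) := by
    funext stack i
    exact hinner i stack
  rw [houter, PySem.List.foldl_append_eq_flatMap]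
  -- B side
  rw [show List.replicate nqubits.toNat ([] : List (List Char)) =
      (List.range nqubits.toNat).map (fun _ => ([] : List (List Char))) by
    simp [List.map_const']]
  rw [pvBucketsInv nqubits ks nqubits.toNat (fun _ => ([] : List (List Char)))]
  -- both are the same flatten
  rw [show PySem.List.pyRange 0 nqubits 1 =
      (List.range nqubits.toNat).map (fun (k : Nat) => (k : Int)) by
    rw [PySem.List.pyRange_one]
    simp]
  rw [List.flatMap_map]
  rw [show ((List.range nqubits.toNat).map (fun c => [] ++
      ((ks.filter (fun k => PySem.Chars.count (pvBuild nqubits k) ['I'] = c)).map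
        (pvBuild nqubits)))).flatten = (List.range nqubits.toNat).flatMap (fun c =>
      ((ks.filter (fun k => PySem.Chars.count (pvBuild nqubits k) ['I'] = c)).map
        (pvBuild nqubits))) by simp [List.flatMap_def]]
  simp only [List.nil_append]
  have hfil : (fun (c : Nat) => ((ks.filter (fun key =>
      decide ((PySem.Chars.count (pvBuild nqubits key) ['I'] : Int) = ((c : Nat) : Int)))).map
        (pvBuild nqubits))) = (fun (c : Nat) => ((ks.filter (fun k =>
      PySem.Chars.count (pvBuild nqubits k) ['I'] = c)).map (pvBuild nqubits))) := by
    funext c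
    congr 1
    apply List.filter_congr
    intro k _
    simp
  rw [hfil]
-- ===== VERDICT (by name: the statement is the Claim_ definition above) =====
theorem reduce_measurements_wrong_spec : Claim_equal_reduce_measurements_wrong := by
  intro hamiltonian nqubits _
  unfold Spec_reduce_measurements_wrong
  have hstep : (fun (d : PySem.Dict (List Char) (List (List Char))) pauli =>
      let pauli_indeces := get_I_indeces pauli
      let shortened_pauli := remove_at_indeces pauli pauli_indeces
      match pvFindA d.keys pauli_indeces shortened_pauli with
      | some basis => d.modify basis [] (fun v => v ++ [pauli])
      | none => d.insert pauli [pauli]) =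
      (fun (d : PySem.Dict (List Char) (List (List Char))) pauli =>
        match pvFindB d.keys pauli with
        | some basis => d.modify basis [] (fun v => v ++ [pauli])
        | none => d.insert pauli [pauli]) := by
    funext d pauli
    show (match pvFindA d.keys (get_I_indeces pauli)
        (remove_at_indeces pauli (get_I_indeces pauli)) with
      | some basis => d.modify basis [] (fun v => v ++ [pauli])
      | none => d.insert pauli [pauli]) = _
    rw [pvFindEq]
  unfold reduce_measurements_wrong reduce_measurements_wrong_alt
  rw [← pvStackEq, hstep]
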